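-- pv_equiv track=rewrite | github.com/ChrisGVE/workspace-qdrant-mcp | 20250920-2208_codebase_inventory_analysis.py | _identify_missing_rust_elements
-- ===== SOURCE A (Python) =====
-- from typing import Dict, List, Set, Tuple
--
-- def _identify_missing_rust_elements(rust_files: List[str]) -> List[str]:
--     """Identify missing elements in Rust component"""
--     missing = []
--
--     # Check for gRPC server implementation
--     grpc_found = any("grpc" in f.lower() for f in rust_files)
--     if not grpc_found:
--         missing.append("gRPC server implementation")
--
--     # Check for daemon lifecycle management
--     daemon_found = any("daemon" in f and "lifecycle" in f for f in rust_files)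
--     if not daemon_found:
--         missing.append("Production daemon lifecycle management")
--
--     # Check for LSP integration
--     lsp_found = any("lsp" in f.lower() for f in rust_files)
--     if not lsp_found:
--         missing.append("LSP integration module")
--
--     return missing
-- ===== SOURCE B (Python) =====
-- from typing import List
--
-- # Table-driven: classify each file into capability tags, union them into a set,
-- # then filter a fixed requirements table against the found-set.
-- _REQUIREMENTS = [
--     ("grpc", "gRPC server implementation"),
--     ("daemon_lifecycle", "Production daemon lifecycle management"),
--     ("lsp", "LSP integration module"),
-- ]
--
-- def _classify(f: str) -> List[str]:
--     tags = []
--     fl = f.lower()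
--     if "grpc" in fl:
--         tags.append("grpc")
--     if "daemon" in f and "lifecycle" in f:
--         tags.append("daemon_lifecycle")
--     if "lsp" in fl:
--         tags.append("lsp")
--     return tags
--
-- def _identify_missing_rust_elements(rust_files: List[str]) -> List[str]:
--     """Identify missing elements in Rust component (classify files, filter requirements table)."""
--     found = set()
--     for f in rust_files:
--         found.update(_classify(f))
--     return [msg for tag, msg in _REQUIREMENTS if tag not in found]
-- ===== Notes on version B (the rewrite author's own statement) =====
-- stated objective: alternative
-- what changed: Replaced the three hard-coded any(...) scans and append branches by a data-driven design: a per-file classifier maps each file to capability tags, the tags are unioned into a found-set in one pass, and the result is the fixed requirements table filtered against that set.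
import Mathlib
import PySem

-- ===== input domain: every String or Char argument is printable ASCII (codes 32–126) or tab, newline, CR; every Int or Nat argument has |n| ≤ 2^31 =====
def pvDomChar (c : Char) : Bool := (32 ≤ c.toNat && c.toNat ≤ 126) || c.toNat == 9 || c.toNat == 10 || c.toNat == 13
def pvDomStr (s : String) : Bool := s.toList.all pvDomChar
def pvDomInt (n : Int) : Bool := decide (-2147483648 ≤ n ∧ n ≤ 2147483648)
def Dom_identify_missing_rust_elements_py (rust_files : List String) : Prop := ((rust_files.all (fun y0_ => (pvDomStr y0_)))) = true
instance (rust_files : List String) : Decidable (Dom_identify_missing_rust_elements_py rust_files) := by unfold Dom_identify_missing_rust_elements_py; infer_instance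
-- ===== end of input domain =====

-- B replaces A's three hard-coded any(...) scans by a table-driven design: classify each file into tags, union into a found-set, filter a requirements table (objective: alternative).


-- ===== PORT A =====
def identify_missing_rust_elements_py (rust_files : List String) : List String :=
  let missing : List String := []
  let grpc_found := rust_files.any (fun f => PySem.Str.isIn "grpc" (PySem.Str.lower f))
  let missing := if !grpc_found then missing ++ ["gRPC server implementation"] else missing
  let daemon_found := rust_files.any (fun f => PySem.Str.isIn "daemon" f && PySem.Str.isIn "lifecycle" f)
  let missing := if !daemon_found then missing ++ ["Production daemon lifecycle management"] else missing
  let lsp_found := rust_files.any (fun f => PySem.Str.isIn "lsp" (PySem.Str.lower f))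
  let missing := if !lsp_found then missing ++ ["LSP integration module"] else missing
  missing

-- ===== PORT B =====
def pvRequirements : List (String × String) :=
  [("grpc", "gRPC server implementation"),
   ("daemon_lifecycle", "Production daemon lifecycle management"),
   ("lsp", "LSP integration module")]

def pvClassify (f : String) : List String :=
  let tags : List String := []
  let fl := PySem.Str.lower f
  let tags := if PySem.Str.isIn "grpc" fl then tags ++ ["grpc"] else tags
  let tags := if PySem.Str.isIn "daemon" f && PySem.Str.isIn "lifecycle" f then tags ++ ["daemon_lifecycle"] else tags
  let tags := if PySem.Str.isIn "lsp" fl then tags ++ ["lsp"] else tags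
  tags

def identify_missing_rust_elements_py_alt (rust_files : List String) : List String :=
  let found : PySem.Set String :=
    rust_files.foldl (fun s f => PySem.Set.update s (pvClassify f)) PySem.Set.empty
  (pvRequirements.filter (fun p => !(PySem.Set.contains found p.1))).map (fun p => p.2)

-- ===== PRECONDITION & SPEC =====
def Spec_identify_missing_rust_elements_py (rust_files : List String) (out : List String) : Prop := out = identify_missing_rust_elements_py_alt rust_files
instance (rust_files : List String) (out : List String) : Decidable (Spec_identify_missing_rust_elements_py rust_files out) := by unfold Spec_identify_missing_rust_elements_py; infer_instance

-- ===== CLAIM =====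
def Claim_equal_identify_missing_rust_elements_py : Prop := ∀ (rust_files : List String), Dom_identify_missing_rust_elements_py rust_files → Spec_identify_missing_rust_elements_py rust_files (identify_missing_rust_elements_py rust_files)

-- ===== LEMMAS AND PROOFS =====

-- The nested fold of set-updates is a single fold of set-adds over the flattened tag lists.
theorem foldl_update_eq (xs : List String) (s : PySem.Set String) :
    xs.foldl (fun s f => PySem.Set.update s (pvClassify f)) s
      = (xs.flatMap pvClassify).foldl PySem.Set.add s := by
  induction xs generalizing s with
  | nil => rfl
  | cons x xs ih =>
      rw [List.foldl_cons, ih, List.flatMap_cons, List.foldl_append]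
      rfl

-- Membership in the accumulated found-set: in the start set or in some file's tag list.
theorem mem_found (xs : List String) (s : PySem.Set String) (t : String) :
    (t ∈ xs.foldl (fun s f => PySem.Set.update s (pvClassify f)) s)
      ↔ t ∈ s ∨ ∃ f ∈ xs, t ∈ pvClassify f := by
  rw [foldl_update_eq]
  have h := PySem.Set.mem_foldl_add (l := xs.flatMap pvClassify) (f := fun b => b) (s := s) (y := t)
  rw [h]
  simp [List.mem_flatMap]

-- For each table tag, membership in a file's tag list is exactly A's per-file predicate.
theorem mem_classify_grpc (f : String) :
    ("grpc" ∈ pvClassify f) ↔ PySem.Str.isIn "grpc" (PySem.Str.lower f) = true := by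
  unfold pvClassify
  cases h1 : PySem.Str.isIn "grpc" (PySem.Str.lower f) <;>
    cases h2 : (PySem.Str.isIn "daemon" f && PySem.Str.isIn "lifecycle" f) <;>
      cases h3 : PySem.Str.isIn "lsp" (PySem.Str.lower f) <;>
        simp only [h1, h3] <;> simp

theorem mem_classify_daemon (f : String) :
    ("daemon_lifecycle" ∈ pvClassify f)
      ↔ (PySem.Str.isIn "daemon" f && PySem.Str.isIn "lifecycle" f) = true := by
  unfold pvClassify
  cases h1 : PySem.Str.isIn "grpc" (PySem.Str.lower f) <;>
    cases h2 : (PySem.Str.isIn "daemon" f && PySem.Str.isIn "lifecycle" f) <;>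
      cases h3 : PySem.Str.isIn "lsp" (PySem.Str.lower f) <;>
        simp only [h1, h3] <;> simp

theorem mem_classify_lsp (f : String) :
    ("lsp" ∈ pvClassify f) ↔ PySem.Str.isIn "lsp" (PySem.Str.lower f) = true := by
  unfold pvClassify
  cases h1 : PySem.Str.isIn "grpc" (PySem.Str.lower f) <;>
    cases h2 : (PySem.Str.isIn "daemon" f && PySem.Str.isIn "lifecycle" f) <;>
      cases h3 : PySem.Str.isIn "lsp" (PySem.Str.lower f) <;>
        simp only [h1, h3] <;> simp

-- ===== VERDICT =====
theorem identify_missing_rust_elements_py_spec : Claim_equal_identify_missing_rust_elements_py := by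
  intro rust_files _
  unfold Spec_identify_missing_rust_elements_py identify_missing_rust_elements_py identify_missing_rust_elements_py_alt
  have hG : ("grpc" ∈ rust_files.foldl (fun s f => PySem.Set.update s (pvClassify f)) ([] : PySem.Set String))
      ↔ (rust_files.any (fun f => PySem.Str.isIn "grpc" (PySem.Str.lower f)) = true) := by
    simp only [mem_found, List.any_eq_true, mem_classify_grpc,
      List.not_mem_nil, false_or]
  have hD : ("daemon_lifecycle" ∈ rust_files.foldl (fun s f => PySem.Set.update s (pvClassify f)) ([] : PySem.Set String))
      ↔ (rust_files.any (fun f => PySem.Str.isIn "daemon" f && PySem.Str.isIn "lifecycle" f) = true) := by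
    simp only [mem_found, List.any_eq_true, mem_classify_daemon,
      List.not_mem_nil, false_or]
  have hL : ("lsp" ∈ rust_files.foldl (fun s f => PySem.Set.update s (pvClassify f)) ([] : PySem.Set String))
      ↔ (rust_files.any (fun f => PySem.Str.isIn "lsp" (PySem.Str.lower f)) = true) := by
    simp only [mem_found, List.any_eq_true, mem_classify_lsp,
      List.not_mem_nil, false_or]
  cases hg : rust_files.any (fun f => PySem.Str.isIn "grpc" (PySem.Str.lower f)) <;>
    cases hd : rust_files.any (fun f => PySem.Str.isIn "daemon" f && PySem.Str.isIn "lifecycle" f) <;>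
      cases hl : rust_files.any (fun f => PySem.Str.isIn "lsp" (PySem.Str.lower f)) <;>
        rw [hg] at hG <;> rw [hd] at hD <;> rw [hl] at hL <;>
          simp [pvRequirements, List.filter, hG, hD, hL]
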